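-- pv_equiv track=rewrite | github.com/Ailuropoda1864/adventofcode | 2017/day13.py | pos_cycle
-- ===== SOURCE A (Python) =====
-- def pos_cycle(range_):
--     direction = 1
--     positions = [1]
--     cycle = range_ * 2 - 3
--     for i in range(cycle):
--         if i == range_ - 1:
--             direction = -1
--         positions.append(positions[-1] + direction)
--     return positions
-- ===== SOURCE B (Python) =====
-- def pos_cycle(range_):
--     # Triangular wave built directly from two monotone ranges: the seed position 1,
--     # the rest of the up-ramp 2..range_, then the down-ramp range_-1..2.
--     return [1] + list(range(2, range_ + 1)) + list(range(range_ - 1, 1, -1))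
-- ===== Notes on version B (the rewrite author's own statement) =====
-- stated objective: simpler
-- what changed: Replaces the stateful loop (direction flag, append of last element +/- 1) by a closed-form concatenation of the seed [1] with two explicit range() ramps.
import Mathlib
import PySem

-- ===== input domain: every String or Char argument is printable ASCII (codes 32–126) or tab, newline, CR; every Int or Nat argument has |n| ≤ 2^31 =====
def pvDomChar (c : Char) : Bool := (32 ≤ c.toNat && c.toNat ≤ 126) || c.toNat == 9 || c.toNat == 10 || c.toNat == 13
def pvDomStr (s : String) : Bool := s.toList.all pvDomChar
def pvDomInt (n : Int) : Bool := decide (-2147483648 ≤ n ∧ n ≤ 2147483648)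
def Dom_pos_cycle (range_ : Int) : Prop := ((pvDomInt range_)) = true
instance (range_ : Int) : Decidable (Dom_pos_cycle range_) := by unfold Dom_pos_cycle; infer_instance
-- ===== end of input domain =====

-- B replaces A's stateful direction-flag loop with a closed-form concatenation of the seed and two range() ramps (simpler decomposition; same cost).

-- ===== PORT A =====
def pos_cycle (range_ : Int) : List Int :=
  let cycle := range_ * 2 - 3
  ((PySem.List.pyRange 0 cycle 1).foldl
    (fun (st : Int × List Int) i =>
      let direction := if i = range_ - 1 then (-1 : Int) else st.1
      (direction, st.2 ++ [PySem.List.pyGetD st.2 (-1) 0 + direction]))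
    (1, [1])).2

-- ===== PORT B =====
def pos_cycle_alt (range_ : Int) : List Int :=
  [1] ++ PySem.List.pyRange 2 (range_ + 1) 1 ++ PySem.List.pyRange (range_ - 1) 1 (-1)

-- ===== PRECONDITION & SPEC =====
def Spec_pos_cycle (range_ : Int) (out : List Int) : Prop := out = pos_cycle_alt range_
instance (range_ : Int) (out : List Int) : Decidable (Spec_pos_cycle range_ out) := by unfold Spec_pos_cycle; infer_instance

-- ===== CLAIM (what is proved, stated in full; the proofs are below) =====
def Claim_equal_pos_cycle : Prop := ∀ (range_ : Int), Dom_pos_cycle range_ → Spec_pos_cycle range_ (pos_cycle range_)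

-- ===== LEMMAS AND PROOFS =====

-- A's loop body, named for the lemmas below (definitionally equal to the lambda in pos_cycle).
def pcStep (range_ : Int) (st : Int × List Int) (i : Int) : Int × List Int :=
  let direction := if i = range_ - 1 then (-1 : Int) else st.1
  (direction, st.2 ++ [PySem.List.pyGetD st.2 (-1) 0 + direction])

-- Over a stretch of indices that never hits range_-1 the direction d is constant and
-- the loop appends the arithmetic ramp x+d, x+2d, …
lemma pc_noflip (range_ d : Int) :
    ∀ (n : Nat) (a : Int) (ps : List Int) (x : Int),
      (∀ k : Nat, k < n → a + (k : Int) ≠ range_ - 1) →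
      (PySem.List.pyRange a (a + (n : Int)) 1).foldl (pcStep range_) (d, ps ++ [x]) =
        (d, ps ++ [x] ++ (List.range n).map (fun k : Nat => x + d * ((k : Int) + 1))) := by
  intro n
  induction n with
  | zero =>
    intro a ps x _
    rw [PySem.List.pyRange_one_eq_nil (by omega : a + ((0 : Nat) : Int) ≤ a)]
    simp
  | succ m ih =>
    intro a ps x h
    rw [PySem.List.pyRange_one_cons (by push_cast; omega)]
    have h0 : a ≠ range_ - 1 := by
      have := h 0 (Nat.succ_pos m); simpa using this
    have hstep : pcStep range_ (d, ps ++ [x]) a = (d, (ps ++ [x]) ++ [x + d]) := by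
      simp [pcStep, h0, PySem.List.pyGetD_neg_one_append_singleton]
    have hrange : a + ((m + 1 : Nat) : Int) = (a + 1) + (m : Int) := by push_cast; omega
    rw [List.foldl_cons, hstep, hrange,
        ih (a + 1) (ps ++ [x]) (x + d) (fun k hk => by
          have := h (k + 1) (by omega); push_cast at this; omega)]
    have hmap : (List.range (m + 1)).map (fun k : Nat => x + d * ((k : Int) + 1)) =
        (x + d) :: (List.range m).map (fun k : Nat => (x + d) + d * ((k : Int) + 1)) := by
      rw [List.range_succ_eq_map, List.map_cons, List.map_map]
      refine congrArg₂ _ (by ring) (List.map_congr_left fun k _ => ?_)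
      simp only [Function.comp]
      push_cast
      ring
    rw [hmap]
    simp

lemma pc_eq (range_ : Int) : pos_cycle range_ = pos_cycle_alt range_ := by
  rcases (by omega : range_ ≤ 1 ∨ range_ = 2 ∨ 3 ≤ range_) with h | h | h
  · -- degenerate: the loop range and both ramps are empty
    show (List.foldl (pcStep range_) (1, [1]) (PySem.List.pyRange 0 (range_ * 2 - 3) 1)).2 =
      pos_cycle_alt range_
    unfold pos_cycle_alt
    rw [PySem.List.pyRange_one_eq_nil (by omega : range_ * 2 - 3 ≤ 0),
        PySem.List.pyRange_one_eq_nil (by omega : range_ + 1 ≤ 2),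
        PySem.List.pyRange_neg_one_eq_nil (by omega : range_ - 1 ≤ 1)]
    simp
  · subst h; decide
  · -- general case: split the loop at i = range_ - 1
    have hup : (0 : Int) + (((range_ - 1).toNat : Nat) : Int) = range_ - 1 := by
      omega
    show (List.foldl (pcStep range_) (1, [1]) (PySem.List.pyRange 0 (range_ * 2 - 3) 1)).2 =
      pos_cycle_alt range_
    rw [PySem.List.pyRange_one_append 0 (range_ - 1) (range_ * 2 - 3) (by omega) (by omega),
        List.foldl_append]
    -- up-phase: from [1], append 2, 3, …, range_
    have hA := pc_noflip range_ 1 (range_ - 1).toNat 0 [] 1 (fun k hk => by omega)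
    rw [hup] at hA
    simp only [List.nil_append] at hA
    rw [hA]
    -- identify the up-phase list with 1 :: pyRange 2 range_ 1 ++ [range_]
    have hupList : ([1] : List Int) ++ (List.range (range_ - 1).toNat).map
        (fun k : Nat => 1 + 1 * ((k : Int) + 1)) =
        (1 :: PySem.List.pyRange 2 range_ 1) ++ [range_] := by
      have h2 : PySem.List.pyRange 2 (range_ + 1) 1 = PySem.List.pyRange 2 range_ 1 ++ [range_] :=
        PySem.List.pyRange_one_succ_right (by omega : (2 : Int) ≤ range_)
      have h3 : ((1 : Int) :: PySem.List.pyRange 2 range_ 1) ++ [range_] =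
          [1] ++ PySem.List.pyRange 2 (range_ + 1) 1 := by rw [h2]; simp
      rw [h3, PySem.List.pyRange_one 2 (range_ + 1)]
      have hlen : (range_ + 1 - 2).toNat = (range_ - 1).toNat := by omega
      rw [hlen]
      refine congrArg _ (List.map_congr_left fun k _ => ?_)
      ring
    rw [hupList]
    -- flip step at i = range_ - 1, then the down-phase
    rw [PySem.List.pyRange_one_cons (by omega : range_ - 1 < range_ * 2 - 3), List.foldl_cons]
    have hflip : pcStep range_ (1, (1 :: PySem.List.pyRange 2 range_ 1) ++ [range_]) (range_ - 1) =
        (-1, ((1 :: PySem.List.pyRange 2 range_ 1) ++ [range_]) ++ [range_ + -1]) := by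
      simp [pcStep]
      rw [← List.cons_append]
      exact PySem.List.pyGetD_neg_one_append_singleton _ _ _
    rw [hflip]
    have hdn : (range_ - 1 + 1 : Int) + (((range_ - 3).toNat : Nat) : Int) = range_ * 2 - 3 := by
      omega
    have hB := pc_noflip range_ (-1) (range_ - 3).toNat (range_ - 1 + 1)
      ((1 :: PySem.List.pyRange 2 range_ 1) ++ [range_]) (range_ + -1)
      (fun k hk => by omega)
    rw [hdn] at hB
    rw [hB]
    -- assemble and compare with B
    unfold pos_cycle_alt
    have h2 : PySem.List.pyRange 2 (range_ + 1) 1 = PySem.List.pyRange 2 range_ 1 ++ [range_] :=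
      PySem.List.pyRange_one_succ_right (by omega : (2 : Int) ≤ range_)
    rw [h2, PySem.List.pyRange_neg_one (range_ - 1) 1]
    have hlen2 : (range_ - 1 - 1).toNat = (range_ - 3).toNat + 1 := by omega
    rw [hlen2, List.range_succ_eq_map, List.map_cons, List.map_map]
    simp only [List.append_assoc, List.cons_append, List.nil_append]
    refine congrArg _ (congrArg _ (congrArg _ ?_))
    refine congrArg₂ _ (by ring) ?_
    refine (List.map_congr_left fun k _ => ?_)
    simp only [Function.comp]
    push_cast; ring

-- ===== VERDICT (by name: the statement is the Claim_ definition above) =====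
theorem pos_cycle_spec : Claim_equal_pos_cycle := by
  intro range_ _
  unfold Spec_pos_cycle
  exact pc_eq range_
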